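-- pv_equiv track=rewrite | github.com/d0tTino/GeneCoder | src/genecoder/error_correction.py | decode_triple_repeat
-- ===== SOURCE A (Python) =====
-- def decode_triple_repeat(dna_sequence: str) -> tuple[str, int, int]:
--     """Decodes a triple-repeated DNA sequence, correcting single errors in triplets.
--
--     Args:
--         dna_sequence: The triple-repeated DNA sequence (e.g., "AAATTTGGGCC" or "AAGTCTGGGCC").
--
--     Returns:
--         A tuple containing:
--             - corrected_sequence (str): The decoded DNA sequence.
--             - corrected_errors (int): Number of triplets where a correction was made.
--             - uncorrectable_errors (int): Number of triplets where all bases differed.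
--
--     Raises:
--         ValueError: If the input sequence length is not a multiple of 3.
--     """
--     if len(dna_sequence) % 3 != 0:
--         raise ValueError("Input DNA sequence length must be a multiple of 3 for triple repeat decoding.")
--
--     if not dna_sequence: # Handle empty sequence input after length check
--         return "", 0, 0
--
--     decoded_nucleotides = []
--     corrected_errors_count = 0
--     uncorrectable_errors_count = 0
--
--     i = 0
--     while i < len(dna_sequence):
--         triplet = dna_sequence[i:i+3]
--
--         # Count occurrences of each nucleotide in the triplet
--         counts = {}
--         for nucleotide in triplet:
--             counts[nucleotide] = counts.get(nucleotide, 0) + 1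
--
--         if len(counts) == 1: # All three are the same (e.g., "AAA")
--             decoded_nucleotides.append(triplet[0])
--         elif len(counts) == 2: # Two out of three are the same (e.g., "AAG")
--             corrected_errors_count += 1
--             for nucleotide, count in counts.items():
--                 if count == 2:
--                     decoded_nucleotides.append(nucleotide)
--                     break
--         else: # All three are different (e.g., "AGC")
--             uncorrectable_errors_count += 1
--             decoded_nucleotides.append(triplet[0]) # Decode to the first nucleotide
--
--         i += 3
--
--     return "".join(decoded_nucleotides), corrected_errors_count, uncorrectable_errors_count
-- ===== SOURCE B (Python) =====
-- def decode_triple_repeat(dna_sequence: str) -> tuple[str, int, int]: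
--     if len(dna_sequence) % 3 != 0:
--         raise ValueError("Input DNA sequence length must be a multiple of 3 for triple repeat decoding.")
--     # Transpose into columns via strided slices, then decide each triplet by
--     # majority (max by count; Python's max returns the FIRST maximal element,
--     # which is triplet[0] when all three differ) and count error classes by
--     # the number of distinct bases per triplet.
--     triplets = list(zip(dna_sequence[0::3], dna_sequence[1::3], dna_sequence[2::3]))
--     decoded = "".join(max(t, key=t.count) for t in triplets)
--     distinct = [len(set(t)) for t in triplets]
--     return decoded, distinct.count(2), distinct.count(3)
-- ===== Notes on version B (the rewrite author's own statement) =====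
-- stated objective: alternative
-- what changed: Replaces A's single while-loop with per-triplet counting dicts by a staged pipeline: transpose the string into three strided slices, zip them into triplets, decode each triplet with max(t, key=t.count), and derive both error counters afterwards by counting triplets with 2 or 3 distinct bases.
import Mathlib
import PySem

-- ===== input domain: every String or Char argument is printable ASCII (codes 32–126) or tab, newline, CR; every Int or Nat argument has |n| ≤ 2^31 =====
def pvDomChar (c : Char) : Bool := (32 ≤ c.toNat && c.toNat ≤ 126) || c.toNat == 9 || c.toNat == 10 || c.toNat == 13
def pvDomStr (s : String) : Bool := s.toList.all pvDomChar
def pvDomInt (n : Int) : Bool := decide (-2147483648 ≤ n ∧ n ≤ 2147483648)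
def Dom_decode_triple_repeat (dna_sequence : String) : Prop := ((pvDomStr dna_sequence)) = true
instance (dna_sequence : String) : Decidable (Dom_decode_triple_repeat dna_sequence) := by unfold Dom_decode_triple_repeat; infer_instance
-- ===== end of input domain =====

-- B restructures the decoder into staged passes: transpose via strided slices
-- s[0::3]/s[1::3]/s[2::3], zip into triplets, decode each by max-by-count, and
-- count error classes from the per-triplet number of distinct bases (objective: alternative).


-- ===== PORT A =====
-- 'for nucleotide, count in counts.items(): if count == 2: append(nucleotide); break'
def pvFindCount2 : List (Char × Int) → Option Char
  | [] => none
  | (k, v) :: rest => if v == 2 then some k else pvFindCount2 rest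

-- the while loop of A, on the remaining suffix of the string; triplet = dna_sequence[i:i+3]
def pvLoopA : List Char → List Char → Int → Int → List Char × Int × Int
  | [], acc, ce, ue => (acc, ce, ue)
  | x :: rest, acc, ce, ue =>
    let triplet := List.take 3 (x :: rest)
    let counts := triplet.foldl (fun d n => d.insert n (d.getD n 0 + 1)) (PySem.Dict.empty)
    if counts.size == 1 then
      pvLoopA (rest.drop 2) (acc ++ [x]) ce ue          -- triplet[0] = x
    else if counts.size == 2 then
      match pvFindCount2 counts.items with
      | some k => pvLoopA (rest.drop 2) (acc ++ [k]) (ce + 1) ue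
      | none => pvLoopA (rest.drop 2) acc (ce + 1) ue   -- unreachable: some count is 2
    else
      pvLoopA (rest.drop 2) (acc ++ [x]) ce (ue + 1)    -- triplet[0] = x
termination_by l _ _ _ => l.length
decreasing_by all_goals (simp only [List.length_drop, List.length_cons]; omega)

def decode_triple_repeat (dna_sequence : String) : String × Int × Int :=
  if dna_sequence.toList.length % 3 ≠ 0 then ("", 0, 0)  -- Python raises ValueError here; excluded by Pre_
  else if dna_sequence.toList = [] then ("", 0, 0)
  else
    let r := pvLoopA dna_sequence.toList [] 0 0
    (String.ofList r.1, r.2.1, r.2.2)                        -- "".join(decoded_nucleotides)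

-- ===== PORT B =====
-- hand port of the extended slice s[k::3] (PySem has no lemmas for step 3):
-- exact, since for 0 ≤ k < len and step 3 Python takes indices k, k+3, k+6, …
-- and this is 'first element, then every third of the rest', applied to s.drop k.
def pvStride3 : List Char → List Char
  | x :: rest => x :: pvStride3 (rest.drop 2)
  | [] => []
termination_by l => l.length
decreasing_by simp only [List.length_drop, List.length_cons]; omega

-- zip(xs, ys, zs): truncates at the shortest argument, like Python's zip
def pvZip3 : List Char → List Char → List Char → List (Char × Char × Char)
  | a :: as, b :: bs, c :: cs => (a, b, c) :: pvZip3 as bs cs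
  | _, _, _ => []

-- max(t, key=t.count): first element of the triplet with maximal count
def pvPick (t : Char × Char × Char) : Char :=
  let l := [t.1, t.2.1, t.2.2]
  match PySem.List.max? l (fun x => PySem.List.count l x) with
  | some m => m
  | none => t.1  -- unreachable: the list is nonempty

-- len(set(t))
def pvDistinct (t : Char × Char × Char) : Int :=
  ((PySem.Set.ofList [t.1, t.2.1, t.2.2]).length : Int)

def decode_triple_repeat_alt (dna_sequence : String) : String × Int × Int :=
  if dna_sequence.toList.length % 3 ≠ 0 then ("", 0, 0)  -- Python raises ValueError here; excluded by Pre_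
  else
    let l := dna_sequence.toList
    let triplets := pvZip3 (pvStride3 l) (pvStride3 (l.drop 1)) (pvStride3 (l.drop 2))
    let decoded := String.ofList (triplets.map pvPick)
    let distinct := triplets.map pvDistinct
    (decoded, (PySem.List.count distinct 2 : Int), (PySem.List.count distinct 3 : Int))

-- ===== PRECONDITION & SPEC =====
-- A raises ValueError when the length is not a multiple of 3; exactly those inputs are excluded.
def Pre_decode_triple_repeat (dna_sequence : String) : Prop := dna_sequence.toList.length % 3 = 0
instance (dna_sequence : String) : Decidable (Pre_decode_triple_repeat dna_sequence) := by unfold Pre_decode_triple_repeat; infer_instance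
def pvWitness_decode_triple_repeat : String := "AAGTTT"

def Spec_decode_triple_repeat (dna_sequence : String) (out : String × Int × Int) : Prop := out = decode_triple_repeat_alt dna_sequence
instance (dna_sequence : String) (out : String × Int × Int) : Decidable (Spec_decode_triple_repeat dna_sequence out) := by unfold Spec_decode_triple_repeat; infer_instance

-- ===== CLAIM (what is proved, stated in full; the proofs are below) =====
def Claim_equal_decode_triple_repeat : Prop := ∀ (dna_sequence : String), Dom_decode_triple_repeat dna_sequence → Pre_decode_triple_repeat dna_sequence → Spec_decode_triple_repeat dna_sequence (decode_triple_repeat dna_sequence)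

-- ===== LEMMAS AND PROOFS =====

-- induction helper: consume the list three characters at a time
def pvTriples : List Char → List (Char × Char × Char)
  | a :: b :: c :: rest => (a, b, c) :: pvTriples rest
  | _ => []

-- the transpose-then-zip pipeline of B peels off one triplet at a time
lemma pvZipT_cons (a b c : Char) (rest : List Char) :
    pvZip3 (pvStride3 (a :: b :: c :: rest))
           (pvStride3 ((a :: b :: c :: rest).drop 1))
           (pvStride3 ((a :: b :: c :: rest).drop 2))
      = (a, b, c) :: pvZip3 (pvStride3 rest) (pvStride3 (rest.drop 1)) (pvStride3 (rest.drop 2)) := by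
  conv_lhs => rw [pvStride3.eq_def, pvStride3.eq_def, pvStride3.eq_def]
  simp [pvZip3]

lemma pvLoopA_eq : ∀ (l : List Char), l.length % 3 = 0 →
    ∀ acc ce ue, pvLoopA l acc ce ue =
      (acc ++ (pvZip3 (pvStride3 l) (pvStride3 (l.drop 1)) (pvStride3 (l.drop 2))).map pvPick,
       ce + ((PySem.List.count ((pvZip3 (pvStride3 l) (pvStride3 (l.drop 1)) (pvStride3 (l.drop 2))).map pvDistinct) 2 : Nat) : Int),
       ue + ((PySem.List.count ((pvZip3 (pvStride3 l) (pvStride3 (l.drop 1)) (pvStride3 (l.drop 2))).map pvDistinct) 3 : Nat) : Int)) := by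
  intro l
  induction l using pvTriples.induct with
  | case1 a b c rest ih =>
    intro h acc ce ue
    have hr : rest.length % 3 = 0 := by simp only [List.length_cons] at h; omega
    have hrec := ih hr
    rw [pvZipT_cons]
    by_cases hab : a = b
    · by_cases hac : a = c
      · -- all three equal
        subst hab; subst hac
        simp [pvLoopA, PySem.Dict.insert, PySem.Dict.getD, PySem.Dict.get?,
          PySem.Dict.size, PySem.Dict.empty, PySem.Dict.contains, hrec,
          pvPick, pvDistinct, PySem.List.max?, PySem.List.count,
          PySem.Set.ofList, PySem.Set.add, PySem.Set.empty]
      · -- a = b ≠ c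
        subst hab
        simp [pvLoopA, PySem.Dict.insert, PySem.Dict.getD, PySem.Dict.get?,
          PySem.Dict.size, PySem.Dict.empty, PySem.Dict.contains, pvFindCount2, hac, Ne.symm hac, hrec,
          pvPick, pvDistinct, PySem.List.max?, PySem.List.count,
          PySem.Set.ofList, PySem.Set.add, PySem.Set.empty]
        omega
    · by_cases hac : a = c
      · -- a = c ≠ b
        subst hac
        simp [pvLoopA, PySem.Dict.insert, PySem.Dict.getD, PySem.Dict.get?,
          PySem.Dict.size, PySem.Dict.empty, PySem.Dict.contains, pvFindCount2, hab, Ne.symm hab, hrec,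
          pvPick, pvDistinct, PySem.List.max?, PySem.List.count,
          PySem.Set.ofList, PySem.Set.add, PySem.Set.empty]
        omega
      · by_cases hbc : b = c
        · -- b = c ≠ a
          subst hbc
          simp [pvLoopA, PySem.Dict.insert, PySem.Dict.getD, PySem.Dict.get?,
            PySem.Dict.size, PySem.Dict.empty, PySem.Dict.contains, pvFindCount2, hab, Ne.symm hab, hrec,
            pvPick, pvDistinct, PySem.List.max?, PySem.List.count,
            PySem.Set.ofList, PySem.Set.add, PySem.Set.empty]
          omega
        · -- all three distinct
          simp [pvLoopA, PySem.Dict.insert, PySem.Dict.getD, PySem.Dict.get?,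
            PySem.Dict.size, PySem.Dict.empty, PySem.Dict.contains, hab, hac, hbc,
            Ne.symm hab, Ne.symm hac, Ne.symm hbc, hrec,
            pvPick, pvDistinct, PySem.List.max?, PySem.List.count,
            PySem.Set.ofList, PySem.Set.add, PySem.Set.empty]
          omega
  | case2 t hne =>
    intro h acc ce ue
    match t, hne with
    | [], _ => simp [pvLoopA, pvStride3, pvZip3]
    | [a], hne => simp at h
    | [a, b], hne => simp at h
    | (a :: b :: c :: rest), hne => exact (hne a b c rest rfl).elim

-- ===== VERDICT (by name: the statement is the Claim_ definition above) =====
theorem decode_triple_repeat_spec : Claim_equal_decode_triple_repeat := by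
  intro s _ hpre
  unfold Spec_decode_triple_repeat decode_triple_repeat decode_triple_repeat_alt
  have h : s.toList.length % 3 = 0 := hpre
  simp only [h]
  by_cases he : s.toList = []
  · simp [he, pvStride3, pvZip3, PySem.List.count]
  · simp [he, pvLoopA_eq s.toList h]
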